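-- pv_equiv track=rewrite | github.com/harcodee/DSA | Difficulty: Medium/Power Of Numbers/power-of-numbers.py | reverseexponentiation
-- ===== SOURCE A (Python) =====
-- def reverseexponentiation(n):
--     # code here
--     rev = 0
--     temp = n
--     while temp > 0 :
--         r = temp % 10
--         rev = rev * 10 + r
--         temp //= 10
--
--
--     return n ** rev
-- ===== SOURCE B (Python) =====
-- def reverseexponentiation(n):
--     # Recursive digit reversal: place each digit at its power of ten,
--     # instead of A's iterative accumulator loop.
--     def numdigits(m):
--         return 1 if m < 10 else 1 + numdigits(m // 10)
--
--     def rev(m):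
--         if m < 10:
--             return m
--         return rev(m // 10) + (m % 10) * 10 ** (numdigits(m) - 1)
--
--     return n ** (rev(n) if n > 0 else 0)
-- ===== Notes on version B (the rewrite author's own statement) =====
-- stated objective: alternative
-- what changed: Replaces A's iterative accumulator loop (shift the accumulator by one decimal place and add the next digit) with a structural recursion that reverses the number by placing each extracted digit at its correct power of ten via the digit count of the remaining prefix.
import Mathlib
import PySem

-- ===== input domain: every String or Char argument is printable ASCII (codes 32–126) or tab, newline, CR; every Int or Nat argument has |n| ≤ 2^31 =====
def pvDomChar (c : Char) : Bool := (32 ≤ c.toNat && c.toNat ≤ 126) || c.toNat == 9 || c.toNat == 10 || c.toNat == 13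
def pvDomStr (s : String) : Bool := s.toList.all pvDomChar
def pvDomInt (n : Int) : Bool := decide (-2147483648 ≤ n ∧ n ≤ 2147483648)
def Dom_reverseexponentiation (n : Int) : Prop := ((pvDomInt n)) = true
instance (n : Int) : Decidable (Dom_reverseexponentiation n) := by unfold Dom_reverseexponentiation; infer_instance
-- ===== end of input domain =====

-- B replaces A's iterative accumulator loop by a structural recursion that places
-- each digit at its power of ten (alternative decomposition; not claimed faster).

-- ===== PORT A =====
-- the while loop: state (temp, rev); one step per iteration, exactly A's updates
def pvRevLoop (temp rev : Int) : Int :=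
  if _h : temp > 0 then
    pvRevLoop (PySem.Int.floordiv temp 10) (rev * 10 + PySem.Int.mod temp 10)
  else rev
termination_by temp.toNat
decreasing_by
  rw [PySem.Int.floordiv_eq_ediv_of_pos (by norm_num)]
  omega

def reverseexponentiation (n : Int) : Int := n ^ (pvRevLoop n 0).toNat

-- ===== PORT B =====
def pvNumdigits (m : Int) : Int :=
  if _h : m < 10 then 1
  else 1 + pvNumdigits (PySem.Int.floordiv m 10)
termination_by m.toNat
decreasing_by
  rw [PySem.Int.floordiv_eq_ediv_of_pos (by norm_num)]
  omega

def pvRev (m : Int) : Int :=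
  if _h : m < 10 then m
  else pvRev (PySem.Int.floordiv m 10) + PySem.Int.mod m 10 * 10 ^ (pvNumdigits m - 1).toNat
termination_by m.toNat
decreasing_by
  rw [PySem.Int.floordiv_eq_ediv_of_pos (by norm_num)]
  omega

def reverseexponentiation_alt (n : Int) : Int :=
  n ^ (if n > 0 then pvRev n else 0).toNat

-- ===== PRECONDITION & SPEC =====
def Spec_reverseexponentiation (n : Int) (out : Int) : Prop := out = reverseexponentiation_alt n
instance (n : Int) (out : Int) : Decidable (Spec_reverseexponentiation n out) := by unfold Spec_reverseexponentiation; infer_instance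

-- ===== CLAIM (what is proved, stated in full; the proofs are below) =====
def Claim_equal_reverseexponentiation : Prop := ∀ (n : Int), Dom_reverseexponentiation n → Spec_reverseexponentiation n (reverseexponentiation n)

-- ===== LEMMAS AND PROOFS =====

lemma pvRevLoop_nonpos (temp rev : Int) (h : ¬ temp > 0) : pvRevLoop temp rev = rev := by
  rw [pvRevLoop]; simp [h]

lemma pvFloordiv_ten (t : Int) : PySem.Int.floordiv t 10 = t / 10 :=
  PySem.Int.floordiv_eq_ediv_of_pos (by norm_num)

lemma pvMod_ten (t : Int) : PySem.Int.mod t 10 = t % 10 :=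
  PySem.Int.mod_eq_emod_of_pos (by norm_num)

lemma pvRevLoop_pos (t rev : Int) (h : 0 < t) :
    pvRevLoop t rev = pvRevLoop (PySem.Int.floordiv t 10) (rev * 10 + PySem.Int.mod t 10) := by
  rw [pvRevLoop]; simp [h]

lemma pvNumdigits_pos (m : Int) : 1 ≤ pvNumdigits m := by
  have H : ∀ (k : Nat) (t : Int), t.toNat ≤ k → 1 ≤ pvNumdigits t := by
    intro k
    induction k with
    | zero =>
      intro t htk
      rw [pvNumdigits]
      have h : t < 10 := by omega
      simp [h]
    | succ k ih =>
      intro t htk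
      by_cases h : t < 10
      · rw [pvNumdigits]; simp [h]
      · rw [pvNumdigits]
        simp only [h, dite_false]
        have := ih (PySem.Int.floordiv t 10) (by rw [pvFloordiv_ten]; omega)
        omega
  exact H m.toNat m le_rfl

-- shift lemma: the accumulator factors out as rev · 10^(number of digits)
lemma pvRevLoop_shift (temp : Int) (hp : 0 < temp) (rev : Int) :
    pvRevLoop temp rev = rev * 10 ^ (pvNumdigits temp).toNat + pvRevLoop temp 0 := by
  have H : ∀ (k : Nat) (t : Int), t.toNat ≤ k → 0 < t → ∀ rev,
      pvRevLoop t rev = rev * 10 ^ (pvNumdigits t).toNat + pvRevLoop t 0 := by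
    intro k
    induction k with
    | zero => intro t htk ht; omega
    | succ k ih =>
      intro t htk ht rev
      by_cases h10 : t < 10
      · rw [pvRevLoop_pos t rev ht, pvRevLoop_pos t 0 ht]
        have hd : PySem.Int.floordiv t 10 = 0 := by rw [pvFloordiv_ten]; omega
        have hm : PySem.Int.mod t 10 = t := by rw [pvMod_ten]; omega
        rw [hd, hm, pvRevLoop_nonpos 0 _ (by norm_num), pvRevLoop_nonpos 0 _ (by norm_num)]
        rw [pvNumdigits]
        simp [h10]
      · have hdpos : 0 < PySem.Int.floordiv t 10 := by rw [pvFloordiv_ten]; omega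
        have hdk : (PySem.Int.floordiv t 10).toNat ≤ k := by rw [pvFloordiv_ten]; omega
        rw [pvRevLoop_pos t rev ht, pvRevLoop_pos t 0 ht]
        rw [ih _ hdk hdpos (rev * 10 + PySem.Int.mod t 10),
          ih _ hdk hdpos (0 * 10 + PySem.Int.mod t 10)]
        have hnum : (pvNumdigits t).toNat = (pvNumdigits (PySem.Int.floordiv t 10)).toNat + 1 := by
          rw [pvNumdigits]
          simp only [h10, dite_false]
          have := pvNumdigits_pos (PySem.Int.floordiv t 10)
          omega
        rw [hnum]; ring
  exact H temp.toNat temp le_rfl hp rev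

lemma pvRev_eq_loop (m : Int) (hp : 0 < m) : pvRev m = pvRevLoop m 0 := by
  have H : ∀ (k : Nat) (t : Int), t.toNat ≤ k → 0 < t → pvRev t = pvRevLoop t 0 := by
    intro k
    induction k with
    | zero => intro t htk ht; omega
    | succ k ih =>
      intro t htk ht
      by_cases h10 : t < 10
      · rw [pvRev, pvRevLoop]
        simp only [h10, dite_true, ht]
        have hd : PySem.Int.floordiv t 10 = 0 := by rw [pvFloordiv_ten]; omega
        have hm : PySem.Int.mod t 10 = t := by rw [pvMod_ten]; omega
        rw [hd, hm, pvRevLoop_nonpos 0 _ (by norm_num)]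
        ring
      · have hdpos : 0 < PySem.Int.floordiv t 10 := by rw [pvFloordiv_ten]; omega
        have hdk : (PySem.Int.floordiv t 10).toNat ≤ k := by rw [pvFloordiv_ten]; omega
        rw [pvRev, pvRevLoop]
        simp only [h10, dite_false, ht, dite_true]
        have hz : (0 : Int) * 10 + PySem.Int.mod t 10 = PySem.Int.mod t 10 := by ring
        rw [hz, ih _ hdk hdpos,
          pvRevLoop_shift (PySem.Int.floordiv t 10) hdpos (PySem.Int.mod t 10)]
        have hnum : (pvNumdigits t - 1).toNat = (pvNumdigits (PySem.Int.floordiv t 10)).toNat := by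
          rw [pvNumdigits]
          simp only [h10, dite_false]
          have := pvNumdigits_pos (PySem.Int.floordiv t 10)
          omega
        rw [hnum]; ring
  exact H m.toNat m le_rfl hp

-- ===== VERDICT (by name: the statement is the Claim_ definition above) =====
theorem reverseexponentiation_spec : Claim_equal_reverseexponentiation := by
  intro n _hd
  unfold Spec_reverseexponentiation reverseexponentiation reverseexponentiation_alt
  by_cases hp : n > 0
  · rw [pvRev_eq_loop n hp]; simp [hp]
  · rw [pvRevLoop_nonpos _ _ hp]; simp [hp]
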